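-- pv_equiv track=rewrite | github.com/MonashBioinformaticsPlatform/RSeQC | rseqc/qcmodule/bam_cigar.py | fetch_clip
-- ===== SOURCE A (Python) =====
-- def fetch_clip(chrom, st, cigar):
-- 	''' fetch head soft clip regions defined by cigar. st must be zero based
-- 	return list of tuple of (chrom,st, end)
-- 	'''
-- 	#match = re.compile(r'(\d+)(\D)')
-- 	chrom_st = st
-- 	clip_bound =[]
-- 	for c,s in cigar:	#code and size
-- 		if c==0:		#match
-- 			chrom_st += s
-- 		elif c==1:		#insertion to ref
-- 			continue
-- 		elif c==2:		#deletion to ref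
-- 			chrom_st += s
-- 		elif c==3:		#gap or intron
-- 			chrom_st += s
-- 		elif c==4:		#soft clipping. We do NOT include soft clip as part of exon
-- 			clip_bound.append((chrom, chrom_st, chrom_st + s))
-- 			chrom_st += s
-- 		else:
-- 			continue
-- 	return clip_bound
-- ===== SOURCE B (Python) =====
-- def fetch_clip(chrom, st, cigar):
--     ''' fetch head soft clip regions defined by cigar. st must be zero based
--     return list of tuple of (chrom,st, end)
--     '''
--     def rel(ops):
--         # clip intervals of ops, relative to the reference position where ops begins
--         if not ops:
--             return []
--         c, s = ops[0]
--         rest = rel(ops[1:])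
--         if c == 4:
--             return [(0, s)] + [(a + s, b + s) for a, b in rest]
--         if c in (0, 2, 3):
--             return [(a + s, b + s) for a, b in rest]
--         return rest
--     return [(chrom, st + a, st + b) for a, b in rel(cigar)]
-- ===== Notes on version B (the rewrite author's own statement) =====
-- stated objective: alternative
-- what changed: Replaces A's left-to-right accumulator loop with structural recursion on the cigar tail that builds the clip list back-to-front in coordinates relative to each suffix (shifting the recursive result by the op's consumed width), anchoring to st only in a final projection; no running position is maintained.
import Mathlib
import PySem

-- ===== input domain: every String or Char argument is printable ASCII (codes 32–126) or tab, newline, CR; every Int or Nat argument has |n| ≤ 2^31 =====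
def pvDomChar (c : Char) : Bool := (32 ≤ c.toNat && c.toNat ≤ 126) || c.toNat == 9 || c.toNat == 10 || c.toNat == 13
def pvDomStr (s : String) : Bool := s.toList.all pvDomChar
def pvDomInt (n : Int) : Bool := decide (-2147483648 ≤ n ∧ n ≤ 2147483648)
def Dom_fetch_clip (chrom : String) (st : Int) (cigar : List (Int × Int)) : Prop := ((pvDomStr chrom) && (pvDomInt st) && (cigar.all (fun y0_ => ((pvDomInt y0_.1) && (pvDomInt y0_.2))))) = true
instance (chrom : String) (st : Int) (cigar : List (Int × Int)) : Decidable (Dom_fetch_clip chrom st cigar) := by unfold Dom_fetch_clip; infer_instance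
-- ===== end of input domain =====

-- B builds the clip list by structural recursion back-to-front in suffix-relative coordinates (alternative decomposition, same return value; no speed claim).


-- ===== PORT A =====
def fetch_clip (chrom : String) (st : Int) (cigar : List (Int × Int)) : List (String × Int × Int) :=
  (cigar.foldl (fun (acc : Int × List (String × Int × Int)) cs =>
      let c := cs.1; let s := cs.2
      let chrom_st := acc.1; let clip_bound := acc.2
      if c = 0 then (chrom_st + s, clip_bound)
      else if c = 1 then (chrom_st, clip_bound)
      else if c = 2 then (chrom_st + s, clip_bound)
      else if c = 3 then (chrom_st + s, clip_bound)
      else if c = 4 then (chrom_st + s, clip_bound ++ [(chrom, chrom_st, chrom_st + s)])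
      else (chrom_st, clip_bound)) (st, [])).2

-- ===== PORT B =====
-- Source B's rel: clip intervals relative to the start of the given suffix, built back-to-front
def relClips : List (Int × Int) → List (Int × Int)
  | [] => []
  | (c, s) :: t =>
    let rest := relClips t
    if c = 4 then (0, s) :: rest.map (fun p => (p.1 + s, p.2 + s))
    else if c = 0 ∨ c = 2 ∨ c = 3 then rest.map (fun p => (p.1 + s, p.2 + s))
    else rest

def fetch_clip_alt (chrom : String) (st : Int) (cigar : List (Int × Int)) : List (String × Int × Int) :=
  (relClips cigar).map (fun p => (chrom, st + p.1, st + p.2))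

-- ===== PRECONDITION & SPEC =====
def Spec_fetch_clip (chrom : String) (st : Int) (cigar : List (Int × Int)) (out : List (String × Int × Int)) : Prop := out = fetch_clip_alt chrom st cigar
instance (chrom : String) (st : Int) (cigar : List (Int × Int)) (out : List (String × Int × Int)) : Decidable (Spec_fetch_clip chrom st cigar out) := by unfold Spec_fetch_clip; infer_instance

-- ===== CLAIM (what is proved, stated in full; the proofs are below) =====
def Claim_equal_fetch_clip : Prop := ∀ (chrom : String) (st : Int) (cigar : List (Int × Int)), Dom_fetch_clip chrom st cigar → Spec_fetch_clip chrom st cigar (fetch_clip chrom st cigar)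

-- ===== LEMMAS AND PROOFS =====

lemma alt_cons (chrom : String) (st : Int) (c s : Int) (t : List (Int × Int)) :
    fetch_clip_alt chrom st ((c, s) :: t) =
      (if c = 4 then [(chrom, st, st + s)] else []) ++
        fetch_clip_alt chrom (if c = 0 ∨ c = 2 ∨ c = 3 ∨ c = 4 then st + s else st) t := by
  simp only [fetch_clip_alt, relClips]
  by_cases h4 : c = 4
  · simp [h4, List.map_map, Function.comp]; ring_nf; intro a b _; exact ⟨trivial, trivial⟩
  · by_cases h : c = 0 ∨ c = 2 ∨ c = 3
    · simp [h4, h, List.map_map, Function.comp]; ring_nf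
      intro a b _; exact ⟨trivial, trivial⟩
    · simp [h4, h]

lemma fold_eq (chrom : String) (cigar : List (Int × Int)) : ∀ (st : Int)
    (acc : List (String × Int × Int)),
    (cigar.foldl (fun (acc : Int × List (String × Int × Int)) cs =>
      let c := cs.1; let s := cs.2
      let chrom_st := acc.1; let clip_bound := acc.2
      if c = 0 then (chrom_st + s, clip_bound)
      else if c = 1 then (chrom_st, clip_bound)
      else if c = 2 then (chrom_st + s, clip_bound)
      else if c = 3 then (chrom_st + s, clip_bound)
      else if c = 4 then (chrom_st + s, clip_bound ++ [(chrom, chrom_st, chrom_st + s)])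
      else (chrom_st, clip_bound)) (st, acc)).2 = acc ++ fetch_clip_alt chrom st cigar := by
  induction cigar with
  | nil => intro st acc; simp [fetch_clip_alt, relClips]
  | cons hd t ih =>
    intro st acc
    obtain ⟨c, s⟩ := hd
    rw [List.foldl_cons, alt_cons]
    by_cases h0 : c = 0
    · simp [h0, ih]
    · by_cases h1 : c = 1
      · simp [h1, ih]
      · by_cases h2 : c = 2
        · simp [h2, ih]
        · by_cases h3 : c = 3
          · simp [h3, ih]
          · by_cases h4 : c = 4
            · simp [h4, ih]
            · simp [h0, h1, h2, h3, h4, ih]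

-- ===== VERDICT =====
theorem fetch_clip_spec : Claim_equal_fetch_clip := by
  intro chrom st cigar _
  show fetch_clip chrom st cigar = fetch_clip_alt chrom st cigar
  simpa [fetch_clip] using fold_eq chrom cigar st []
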